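-- pv_equiv track=rewrite | github.com/peircechow/cpy5p4 | q8_find_uppercase.py | find_num_uppercase
-- ===== SOURCE A (Python) =====
-- def find_num_uppercase(a):
--     if not a:
--         return 0
--     else:
--         if a[0]!=a[0].upper():
--             return find_num_uppercase(a[1:])
--         else:
--             return 1+find_num_uppercase(a[1:])
-- ===== SOURCE B (Python) =====
-- def find_num_uppercase(a):
--     count = 0
--     for c in a:
--         if c == c.upper():
--             count += 1
--     return count
-- ===== Notes on version B (the rewrite author's own statement) =====
-- stated objective: simpler
-- what changed: Replaces the head/tail recursion over successive slices with a single iterative pass accumulating a counter.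
import Mathlib
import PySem

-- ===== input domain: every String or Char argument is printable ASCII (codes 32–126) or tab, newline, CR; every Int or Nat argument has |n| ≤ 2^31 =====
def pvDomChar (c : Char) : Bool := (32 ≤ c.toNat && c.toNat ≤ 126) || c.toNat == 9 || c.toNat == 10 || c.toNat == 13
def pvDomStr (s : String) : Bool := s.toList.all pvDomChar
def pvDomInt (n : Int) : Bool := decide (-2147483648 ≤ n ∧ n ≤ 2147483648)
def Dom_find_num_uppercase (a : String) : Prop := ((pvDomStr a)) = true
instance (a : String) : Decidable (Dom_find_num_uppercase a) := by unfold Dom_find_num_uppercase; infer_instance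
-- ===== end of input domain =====

-- B is an iterative single-pass counter instead of A's recursion over successive slices.

-- ===== PORT A =====
-- recursion over the character list; a[1:] is the tail, a[0].upper() is upperChar
def findA (l : List Char) : Int :=
  match l with
  | [] => 0
  | c :: rest => if c ≠ PySem.Chars.upperChar c then findA rest else 1 + findA rest

def find_num_uppercase (a : String) : Int := findA a.toList

-- ===== PORT B =====
-- iterative pass: counter starts at 0, +1 whenever c == c.upper()
def find_num_uppercase_alt (a : String) : Int :=
  a.toList.foldl (fun count c => if c = PySem.Chars.upperChar c then count + 1 else count) 0

-- ===== PRECONDITION & SPEC =====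
def Spec_find_num_uppercase (a : String) (out : Int) : Prop := out = find_num_uppercase_alt a
instance (a : String) (out : Int) : Decidable (Spec_find_num_uppercase a out) := by unfold Spec_find_num_uppercase; infer_instance

-- ===== CLAIM =====
def Claim_equal_find_num_uppercase : Prop := ∀ (a : String), Dom_find_num_uppercase a → Spec_find_num_uppercase a (find_num_uppercase a)

-- ===== LEMMAS AND PROOFS =====
theorem foldl_shift (l : List Char) (k : Int) :
    l.foldl (fun count c => if c = PySem.Chars.upperChar c then count + 1 else count) k
      = k + l.foldl (fun count c => if c = PySem.Chars.upperChar c then count + 1 else count) 0 := by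
  induction l generalizing k with
  | nil => simp
  | cons c rest ih =>
    simp only [List.foldl]
    rw [ih, ih (if c = PySem.Chars.upperChar c then 0 + 1 else 0)]
    split_ifs <;> omega

theorem findA_eq (l : List Char) :
    findA l = l.foldl (fun count c => if c = PySem.Chars.upperChar c then count + 1 else count) 0 := by
  induction l with
  | nil => rfl
  | cons c rest ih =>
    simp only [findA, List.foldl]
    rw [foldl_shift, ih]
    generalize PySem.Chars.upperChar c = u
    by_cases h : c = u <;> simp [h] <;> omega

-- ===== VERDICT =====
theorem find_num_uppercase_spec : Claim_equal_find_num_uppercase := by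
  intro a _
  unfold Spec_find_num_uppercase find_num_uppercase find_num_uppercase_alt
  exact findA_eq a.toList
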